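-- pv_equiv track=rewrite | github.com/Qaqarot/OpenFermion-Blueqat | openfermionblueqat/bk.py | get_flip_set
-- ===== SOURCE A (Python) =====
-- def get_flip_set(index):
--     """Make flip set"""
--     n = 1
--     while n <= index:
--         n *= 2
--
--     def get(n, j):
--         if j <= 1:
--             return {b for b in range(j)}
--         n_half = n // 2
--         if j < n_half:
--             return get(n_half, j)
--         f = {b + n_half for b in get(n_half, j - n_half)}
--         if j == n - 1:
--             f.add(n_half - 1)
--         return f
--
--     return get(n, index)
-- ===== SOURCE B (Python) =====
-- def get_flip_set(index):
--     """Make flip set: index minus each trailing one bit of index."""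
--     f = set()
--     k = 1
--     while index > 0 and index // k % 2 == 1:
--         f.add(index - k)
--         k *= 2
--     return f
-- ===== Notes on version B (the rewrite author's own statement) =====
-- stated objective: simpler
-- what changed: Replaces the recursive binary-tree descent (building the set bottom-up with +n_half shifts) by a single while loop using the closed form: the flip set contains index minus each of its trailing one bits.
import Mathlib
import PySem

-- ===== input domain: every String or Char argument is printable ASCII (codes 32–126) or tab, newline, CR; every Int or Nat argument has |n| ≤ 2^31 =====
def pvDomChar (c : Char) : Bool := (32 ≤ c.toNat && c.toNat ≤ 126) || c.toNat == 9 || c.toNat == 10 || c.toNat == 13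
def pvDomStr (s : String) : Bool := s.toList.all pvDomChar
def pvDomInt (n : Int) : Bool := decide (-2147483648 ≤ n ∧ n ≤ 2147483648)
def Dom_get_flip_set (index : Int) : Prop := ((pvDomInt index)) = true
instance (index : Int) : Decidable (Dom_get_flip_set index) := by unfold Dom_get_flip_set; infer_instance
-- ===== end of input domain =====

-- B replaces A's recursive binary-tree descent by one loop over the trailing one bits of index
-- (same return value; neither version mutates its argument).

-- ===== PORT A =====
-- while n <= index: n *= 2   (fuel 64 covers every |index| ≤ 2^31 of Dom)
def pvNLoop (index n : Int) : Nat → Int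
  | 0 => n
  | fuel+1 => if n ≤ index then pvNLoop index (2*n) fuel else n

-- the inner recursive helper get(n, j)  (fuel 70 > tree depth for every Dom input)
def pvAGet (n j : Int) : Nat → List Int
  | 0 => []
  | fuel+1 =>
    if j ≤ 1 then PySem.Set.ofList (PySem.List.pyRange 0 j 1)
    else
      let nh := PySem.Int.floordiv n 2
      if j < nh then pvAGet nh j fuel
      else
        let f := PySem.Set.ofList ((pvAGet nh (j - nh) fuel).map (fun b => b + nh))
        if j = n - 1 then PySem.Set.add f (nh - 1) else f

def get_flip_set (index : Int) : List Int :=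
  pvAGet (pvNLoop index 1 64) index 70

-- ===== PORT B =====
-- while index > 0 and index // k % 2 == 1: f.add(index - k); k *= 2   (fuel 70 covers Dom)
def pvBLoop (index k : Int) (f : List Int) : Nat → List Int
  | 0 => f
  | fuel+1 =>
    if 0 < index ∧ PySem.Int.mod (PySem.Int.floordiv index k) 2 = 1 then
      pvBLoop index (2*k) (PySem.Set.add f (index - k)) fuel
    else f

def get_flip_set_alt (index : Int) : List Int :=
  pvBLoop index 1 [] 70

-- ===== PRECONDITION & SPEC =====
def Spec_get_flip_set (index : Int) (out : List Int) : Prop := out = get_flip_set_alt index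
instance (index : Int) (out : List Int) : Decidable (Spec_get_flip_set index out) := by unfold Spec_get_flip_set; infer_instance

-- ===== CLAIM (what is proved, stated in full; the proofs are below) =====
def Claim_equal_get_flip_set : Prop := ∀ (index : Int), Dom_get_flip_set index → Spec_get_flip_set index (get_flip_set index)

-- ===== LEMMAS AND PROOFS =====

-- number of trailing one bits
def pvTone (n : Nat) : Nat :=
  if h : n % 2 = 1 then pvTone (n / 2) + 1 else 0
termination_by n
decreasing_by omega

lemma pvTone_even (n : Nat) (h : n % 2 = 0) : pvTone n = 0 := by
  rw [pvTone]; simp [h]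

lemma pvTone_odd (n : Nat) (h : n % 2 = 1) : pvTone n = pvTone (n / 2) + 1 := by
  rw [pvTone]; simp [h]

lemma pvTone_allones (m : Nat) : pvTone (2 ^ m - 1) = m := by
  induction m with
  | zero => simp [pvTone_even]
  | succ m ih =>
    have h0 : 0 < 2 ^ m := by positivity
    have he : 2 ^ (m+1) = 2 * 2 ^ m := by ring
    have h1 : (2 ^ (m+1) - 1) % 2 = 1 := by omega
    have h2 : (2 ^ (m+1) - 1) / 2 = 2 ^ m - 1 := by omega
    rw [pvTone_odd _ h1, h2, ih]

lemma pvTone_add_pow (m n : Nat) (h1 : 2 ^ m ≤ n) (h2 : n < 2 ^ (m+1))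
    (h3 : n ≠ 2 ^ (m+1) - 1) : pvTone n = pvTone (n - 2 ^ m) := by
  induction m generalizing n with
  | zero => omega
  | succ m ih =>
    have hp : 2 ^ (m+1+1) = 2 * 2 ^ (m+1) := by ring
    have hp' : 2 ^ (m+1) = 2 * 2 ^ m := by ring
    by_cases he : n % 2 = 0
    · rw [pvTone_even _ he, pvTone_even] ; omega
    · have he1 : n % 2 = 1 := by omega
      have he2 : (n - 2 ^ (m+1)) % 2 = 1 := by omega
      rw [pvTone_odd _ he1, pvTone_odd _ he2]
      have hd : (n - 2 ^ (m+1)) / 2 = n / 2 - 2 ^ m := by omega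
      rw [hd, ih (n / 2) (by omega) (by omega) (by omega)]

-- the common value: [index - 2^i for i < pvTone index]
def pvSpecList (j : Int) : List Int :=
  (List.range (pvTone j.toNat)).map (fun i => j - 2 ^ i)

lemma pvSpecList_nonpos (j : Int) (h : j ≤ 0) : pvSpecList j = [] := by
  have : j.toNat = 0 := by omega
  simp [pvSpecList, this, pvTone_even 0 rfl]

lemma pvSpecList_nodup (j : Int) : (pvSpecList j).Nodup := by
  refine (List.nodup_range).map ?_
  intro a b hab
  have h2 : (2:Int) ^ a = 2 ^ b := by linarith
  have h3 : ((2 ^ a : Nat) : Int) = ((2 ^ b : Nat) : Int) := by push_cast; exact h2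
  have h4 : (2:Nat) ^ a = 2 ^ b := by exact_mod_cast h3
  exact Nat.pow_right_injective (by norm_num) h4

-- ===== A side =====

lemma pvNLoop_spec (fuel : Nat) : ∀ (e : Nat) (index : Int), index < 2 ^ (e + fuel) →
    ∃ m : Nat, pvNLoop index (2 ^ e) fuel = 2 ^ m ∧ index < 2 ^ m ∧ m ≤ e + fuel := by
  induction fuel with
  | zero =>
    intro e index h
    exact ⟨e, by simp [pvNLoop], by simpa using h, by omega⟩
  | succ fuel ih =>
    intro e index h
    by_cases hle : (2:Int) ^ e ≤ index
    · have h2 : (2:Int) * 2 ^ e = 2 ^ (e+1) := by ring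
      have h3 : index < 2 ^ (e + 1 + fuel) := by
        have : e + 1 + fuel = e + (fuel + 1) := by omega
        rw [this]; exact h
      obtain ⟨m, hm1, hm2, hm3⟩ := ih (e+1) index h3
      exact ⟨m, by simp [pvNLoop, hle, h2, hm1], hm2, by omega⟩
    · exact ⟨e, by simp [pvNLoop, hle], by omega, by omega⟩

lemma pvAGet_spec (fuel : Nat) : ∀ (m : Nat) (j : Int), m < fuel → j < 2 ^ m →
    pvAGet (2 ^ m) j fuel = pvSpecList j := by
  induction fuel with
  | zero => omega
  | succ fuel ih =>
    intro m j hmf hj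
    by_cases hb : j ≤ 1
    · rcases (by omega : j = 1 ∨ j ≤ 0) with rfl | hle
      · have : PySem.List.pyRange 0 1 1 = [0] := by decide
        simp [pvAGet, this]
        have : (1:Int).toNat = 1 := rfl
        simp [pvSpecList, this, pvTone_odd 1 rfl, pvTone_even 0 rfl]
        decide
      · rw [pvSpecList_nonpos j hle]
        simp [pvAGet, hb, PySem.List.pyRange_one_eq_nil hle]
    · -- j > 1, hence m ≥ 2; write m = m'+1
      have hm2 : 2 ≤ m := by
        by_contra hc
        interval_cases m <;> omega
      obtain ⟨m', rfl⟩ : ∃ m', m = m' + 1 := ⟨m - 1, by omega⟩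
      have hnh : PySem.Int.floordiv (2 ^ (m'+1)) 2 = 2 ^ m' := by
        rw [PySem.Int.floordiv_eq_ediv_of_pos (by norm_num)]
        have : (2:Int) ^ (m'+1) = 2 ^ m' * 2 := by ring
        rw [this, Int.mul_ediv_cancel _ (by norm_num)]
      by_cases hlt : j < 2 ^ m'
      · have := ih m' j (by omega) hlt
        simp only [pvAGet, if_neg (by omega : ¬ j ≤ 1), hnh, if_pos hlt]
        exact this
      · -- right branch
        have hsub : j - 2 ^ m' < 2 ^ m' := by
          have : (2:Int) ^ (m'+1) = 2 ^ m' * 2 := by ring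
          omega
        have hin := ih m' (j - 2 ^ m') (by omega) hsub
        have hjpos : 0 < j := by omega
        have hpc : ((2 ^ m' : Nat) : Int) = 2 ^ m' := by push_cast; ring
        have hcast : ((j - 2 ^ m').toNat) = j.toNat - 2 ^ m' := by omega
        have hmap : (pvSpecList (j - 2 ^ m')).map (fun b => b + 2 ^ m') =
            (List.range (pvTone (j.toNat - 2 ^ m'))).map (fun i => j - 2 ^ i) := by
          simp only [pvSpecList, List.map_map, hcast]
          refine List.map_congr_left ?_
          intro i _
          simp; ring
        have hnodup : ((pvSpecList (j - 2 ^ m')).map (fun b => b + 2 ^ m')).Nodup := by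
          refine (pvSpecList_nodup _).map ?_
          intro a b hab; linarith
        have hnodup2 : ((List.range (pvTone (j.toNat - 2 ^ m'))).map
            (fun i => j - 2 ^ i)).Nodup := hmap ▸ hnodup
        simp only [pvAGet, if_neg (by omega : ¬ j ≤ 1), hnh, if_neg (by omega : ¬ j < 2 ^ m'),
          hin, hmap, PySem.Set.ofList_eq_self_of_nodup _ hnodup2]
        have hpc1 : ((2 ^ (m'+1) : Nat) : Int) = 2 ^ (m'+1) := by push_cast; ring
        have hjn1 : 2 ^ m' ≤ j.toNat := by omega
        have hjn2 : j.toNat < 2 ^ (m'+1) := by omega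
        by_cases htop : j = 2 ^ (m'+1) - 1
        · -- j is all ones: the extra element n_half - 1 is appended
          have hjt : j.toNat = 2 ^ (m'+1) - 1 := by omega
          have hsubt : j.toNat - 2 ^ m' = 2 ^ m' - 1 := by
            have h2p : (2:Nat) ^ (m'+1) = 2 * 2 ^ m' := by ring
            omega
          rw [if_pos htop]
          have htone : pvTone (j.toNat - 2 ^ m') = m' := by rw [hsubt, pvTone_allones]
          have hnotmem : (2:Int) ^ m' - 1 ∉
              (List.range (pvTone (j.toNat - 2 ^ m'))).map (fun i => j - 2 ^ i) := by
            rw [htone]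
            simp only [List.mem_map, List.mem_range, not_exists]
            intro i hcontra
            rcases hcontra with ⟨hi, heq⟩
            have : (2:Int) ^ i < 2 ^ m' := by
              exact pow_lt_pow_right₀ (by norm_num) hi
            omega
          rw [PySem.Set.add_of_not_mem hnotmem, htone]
          simp only [pvSpecList, hjt, pvTone_allones, List.range_succ, List.map_append]
          congr 1
          simp only [List.map_cons, List.map_nil]
          have h2p : (2:Int) ^ (m'+1) = 2 * 2 ^ m' := by ring
          have : j - 2 ^ m' = 2 ^ m' - 1 := by linarith
          rw [this]
        · -- not all ones: no extra element
          rw [if_neg htop]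
          have htone : pvTone j.toNat = pvTone (j.toNat - 2 ^ m') := by
            refine pvTone_add_pow m' j.toNat hjn1 hjn2 ?_
            intro hc
            apply htop
            omega
          simp [pvSpecList, htone]

-- ===== B side =====

lemma pvBLoop_nonpos (index k : Int) (f : List Int) (h : ¬ 0 < index) :
    ∀ fuel, pvBLoop index k f fuel = f := by
  intro fuel
  cases fuel with
  | zero => rfl
  | succ fuel => simp [pvBLoop, h]

lemma pvBLoop_spec (fuel : Nat) : ∀ (jN e : Nat) (acc : List Int), 0 < jN →
    jN < 2 ^ (e + fuel) → (∀ a ∈ acc, (jN : Int) - 2 ^ e < a) →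
    pvBLoop (jN : Int) (2 ^ e) acc fuel =
      acc ++ (List.range (pvTone (jN / 2 ^ e))).map (fun i => (jN : Int) - 2 ^ (e + i)) := by
  induction fuel with
  | zero =>
    intro jN e acc hpos hlt _
    have : jN / 2 ^ e = 0 := Nat.div_eq_of_lt (by simpa using hlt)
    simp [pvBLoop, this, pvTone_even 0 rfl]
  | succ fuel ih =>
    intro jN e acc hpos hlt hacc
    have hfd : PySem.Int.floordiv (jN : Int) (2 ^ e) = ((jN / 2 ^ e : Nat) : Int) := by
      have h1 : ((2:Int) ^ e) = ((2 ^ e : Nat) : Int) := by push_cast; ring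
      rw [h1]; exact PySem.Int.floordiv_natCast jN (2 ^ e)
    by_cases hbit : jN / 2 ^ e % 2 = 1
    · have hguard : 0 < (jN : Int) ∧ PySem.Int.mod (PySem.Int.floordiv (jN : Int) (2 ^ e)) 2 = 1 := by
        constructor
        · exact_mod_cast hpos
        · rw [hfd]
          have : ((2:Int)) = ((2 : Nat) : Int) := by norm_num
          rw [this, PySem.Int.mod_natCast]
          exact_mod_cast hbit
      have hnm : ((jN : Int) - 2 ^ e) ∉ acc := by
        intro hmem
        exact absurd (hacc _ hmem) (by omega)
      have hk : (2:Int) * 2 ^ e = 2 ^ (e+1) := by ring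
      have hacc' : ∀ a ∈ PySem.Set.add acc ((jN : Int) - 2 ^ e), (jN : Int) - 2 ^ (e+1) < a := by
        rw [PySem.Set.add_of_not_mem hnm]
        intro a ha
        have h1 : (2:Int) ^ (e+1) = 2 * 2 ^ e := by ring
        have h2 : (0:Int) < 2 ^ e := by positivity
        rcases List.mem_append.mp ha with h | h
        · have h3 := hacc a h
          linarith
        · have h3 : a = (jN : Int) - 2 ^ e := by simpa using h
          rw [h3]
          linarith
      have hlt' : jN < 2 ^ (e + 1 + fuel) := by
        have : e + 1 + fuel = e + (fuel + 1) := by omega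
        rw [this]; exact hlt
      have hih := ih jN (e+1) (PySem.Set.add acc ((jN : Int) - 2 ^ e)) hpos hlt' hacc'
      simp only [pvBLoop, if_pos hguard, hk]
      rw [hih, PySem.Set.add_of_not_mem hnm]
      have hdd : jN / 2 ^ (e+1) = jN / 2 ^ e / 2 := by
        rw [Nat.div_div_eq_div_mul, pow_succ]
      have htone : pvTone (jN / 2 ^ e) = pvTone (jN / 2 ^ (e+1)) + 1 := by
        rw [pvTone_odd _ hbit, hdd]
      rw [htone, List.range_succ_eq_map, List.map_cons, List.map_map, List.append_assoc,
        List.singleton_append]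
      have hmapeq : List.map (fun i => (jN:Int) - 2 ^ (e + 1 + i))
            (List.range (pvTone (jN / 2 ^ (e+1)))) =
          List.map ((fun i => (jN:Int) - 2 ^ (e + i)) ∘ Nat.succ)
            (List.range (pvTone (jN / 2 ^ (e+1)))) := by
        refine List.map_congr_left ?_
        intro i _
        have hexp : e + 1 + i = e + (i + 1) := by omega
        simp [Function.comp, hexp]
      rw [hmapeq]
      norm_num
    · have hbit0 : jN / 2 ^ e % 2 = 0 := by omega
      have hguard : ¬ (0 < (jN : Int) ∧ PySem.Int.mod (PySem.Int.floordiv (jN : Int) (2 ^ e)) 2 = 1) := by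
        rintro ⟨-, hm⟩
        rw [hfd] at hm
        have h2 : ((2:Int)) = ((2 : Nat) : Int) := by norm_num
        rw [h2, PySem.Int.mod_natCast] at hm
        have : jN / 2 ^ e % 2 = 1 := by exact_mod_cast hm
        omega
      simp only [pvBLoop, if_neg hguard, pvTone_even _ hbit0, List.range_zero, List.map_nil,
        List.append_nil]

-- ===== VERDICT (by name: the statement is the Claim_ definition above) =====
theorem get_flip_set_spec : Claim_equal_get_flip_set := by
  intro index hDom
  unfold Spec_get_flip_set get_flip_set get_flip_set_alt
  have hDom' : -2147483648 ≤ index ∧ index ≤ 2147483648 := by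
    simpa [Dom_get_flip_set, pvDomInt] using hDom
  -- A side
  have hA : pvAGet (pvNLoop index 1 64) index 70 = pvSpecList index := by
    have h64 : index < 2 ^ (0 + 64) := by
      have : (2:Int) ^ (0 + 64) = 18446744073709551616 := by norm_num
      omega
    obtain ⟨m, hm1, hm2, hm3⟩ := pvNLoop_spec 64 0 index h64
    have h1 : (1:Int) = 2 ^ (0:Nat) := by norm_num
    rw [h1, hm1]
    exact pvAGet_spec 70 m index (by omega) hm2
  rw [hA]
  -- B side
  by_cases hpos : 0 < index
  · have hjN : ((index.toNat : Nat) : Int) = index := Int.toNat_of_nonneg hpos.le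
    have hposN : 0 < index.toNat := by omega
    have hltN : index.toNat < 2 ^ (0 + 70) := by
      have : (2:Nat) ^ (0 + 70) = 1180591620717411303424 := by norm_num
      omega
    have hB := pvBLoop_spec 70 index.toNat 0 [] hposN hltN (by simp)
    have h1 : (2:Int) ^ (0:Nat) = 1 := by norm_num
    rw [h1] at hB
    rw [hjN] at hB
    rw [hB]
    simp [pvSpecList, Nat.div_one]
  · rw [pvBLoop_nonpos index 1 [] hpos 70, pvSpecList_nonpos index (by omega)]
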